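-- pv_equiv track=rewrite | github.com/Josh-Decime/Geist-Agent | geist_agent/src/geist_agent/seance/seance_common.py | greedy_line_chunk
-- ===== SOURCE A (Python) =====
-- from typing import List, Tuple, Optional
--
-- DEFAULT_MAX_CHARS_PER_CHUNK = 1200
--
-- DEFAULT_CHUNK_OVERLAP = 150  # approximate chars; converted to lines heuristically
--
-- def greedy_line_chunk(
--     text: str,
--     max_chars: int = DEFAULT_MAX_CHARS_PER_CHUNK,
--     overlap: int = DEFAULT_CHUNK_OVERLAP,
-- ) -> List[Tuple[int, int, str]]:
--     """
--     Greedy, line-preserving chunker with small overlap.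
--     Returns (start_line, end_line, chunk_text) using 1-based line numbers.
--     """
--     lines = text.splitlines()
--     chunks: List[Tuple[int, int, str]] = []
--     start = 0
--     while start < len(lines):
--         block = []
--         length = 0
--         i = start
--         while i < len(lines) and length + len(lines[i]) + 1 <= max_chars:
--             block.append(lines[i])
--             length += len(lines[i]) + 1
--             i += 1
--         if not block:
--             block = [lines[start][:max_chars]]
--             i = start + 1
--         chunk_text = "\n".join(block)
--         # convert char overlap to approx line overlap (80 chars per line heuristic)
--         overlap_lines = max(0, min(overlap // 80, i - start))
--         next_start = (i - overlap_lines) if overlap_lines else i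
--         chunks.append((start + 1, i, chunk_text))
--         start = max(next_start, i)
--     return chunks
-- ===== SOURCE B (Python) =====
-- DEFAULT_MAX_CHARS_PER_CHUNK = 1200
-- DEFAULT_CHUNK_OVERLAP = 150
--
--
-- def greedy_line_chunk(
--     text,
--     max_chars=DEFAULT_MAX_CHARS_PER_CHUNK,
--     overlap=DEFAULT_CHUNK_OVERLAP,
-- ):
--     """Single streaming pass: accumulate lines, flush when the next line
--     would overflow; the (dead) overlap logic is dropped."""
--     lines = text.splitlines()
--     chunks = []
--     cur = []
--     cur_len = 0
--     cur_start = 0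
--     for i, line in enumerate(lines):
--         if cur and cur_len + len(line) + 1 > max_chars:
--             chunks.append((cur_start + 1, i, "\n".join(cur)))
--             cur = []
--             cur_len = 0
--             cur_start = i
--         if not cur and len(line) + 1 > max_chars:
--             chunks.append((i + 1, i + 1, line[:max_chars]))
--             cur_start = i + 1
--         else:
--             cur.append(line)
--             cur_len += len(line) + 1
--     if cur:
--         chunks.append((cur_start + 1, len(lines), "\n".join(cur)))
--     return chunks
-- ===== Notes on version B (the rewrite author's own statement) =====
-- stated objective: simpler
-- what changed: Replaced A's nested while loops with index re-scanning and the dead overlap arithmetic by a single streaming enumerate pass that maintains the current block and flushes it when the next line would overflow; the never-firing overlap computation is dropped.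
import Mathlib
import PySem

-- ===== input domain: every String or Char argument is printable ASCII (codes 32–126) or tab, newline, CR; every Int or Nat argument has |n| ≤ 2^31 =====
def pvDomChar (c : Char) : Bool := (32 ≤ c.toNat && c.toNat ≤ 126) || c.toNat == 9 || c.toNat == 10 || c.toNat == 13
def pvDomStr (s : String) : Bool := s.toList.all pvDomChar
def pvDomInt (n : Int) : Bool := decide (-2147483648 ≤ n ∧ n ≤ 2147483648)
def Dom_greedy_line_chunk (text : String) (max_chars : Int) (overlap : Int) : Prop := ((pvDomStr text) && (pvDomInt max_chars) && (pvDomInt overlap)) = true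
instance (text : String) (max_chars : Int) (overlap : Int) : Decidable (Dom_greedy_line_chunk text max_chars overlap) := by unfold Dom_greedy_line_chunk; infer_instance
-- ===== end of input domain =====

-- B replaces A's nested while loops (and the dead overlap arithmetic, since max(next_start, i) is always i) by one streaming pass over the lines: simpler, same output.

-- ===== PORT A =====
-- inner while: collect lines while they fit, returning (block, i); fuel only makes the loop structural
def pvInnerA (lines : List String) (maxc : Int) : Nat → Nat → Int → List String → List String × Nat
  | 0, i, _, block => (block, i)
  | fuel + 1, i, length, block =>
    if h : i < lines.length then
      if length + PySem.Str.len lines[i] + 1 ≤ maxc then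
        pvInnerA lines maxc fuel (i + 1) (length + PySem.Str.len lines[i] + 1) (block ++ [lines[i]])
      else (block, i)
    else (block, i)

-- outer while over start; fuel lines.length bounds the iteration count; overlap transliterated though start = max(next_start, i) = i
def pvOuterA (lines : List String) (maxc ov : Int) : Nat → Nat → List (Int × Int × String)
  | 0, _ => []
  | fuel + 1, start =>
    if h : start < lines.length then
      let r := pvInnerA lines maxc lines.length start 0 []
      let bi : List String × Nat :=
        if r.1.isEmpty then ([PySem.Str.slice lines[start] none (some maxc)], start + 1) else r
      let overlap_lines : Int := max 0 (min (PySem.Int.floordiv ov 80) ((bi.2 : Int) - (start : Int)))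
      let next_start : Int := if overlap_lines ≠ 0 then (bi.2 : Int) - overlap_lines else (bi.2 : Int)
      ((start : Int) + 1, (bi.2 : Int), PySem.Str.join "\n" bi.1) ::
        pvOuterA lines maxc ov fuel (max next_start (bi.2 : Int)).toNat
    else []

def greedy_line_chunk (text : String) (max_chars : Int) (overlap : Int) : List (Int × Int × String) :=
  let lines := PySem.Str.splitlines text
  pvOuterA lines max_chars overlap lines.length 0

-- ===== PORT B =====
-- one pass over the lines, keeping the current block cur, its joined length, its start index, and the output accumulator
def pvLoopB (nLines : Nat) (maxc : Int) : Nat → List String → List String → Int → Nat → List (Int × Int × String) → List (Int × Int × String)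
  | _, [], cur, _, curStart, acc =>
      if cur.isEmpty then acc
      else acc ++ [((curStart : Int) + 1, (nLines : Int), PySem.Str.join "\n" cur)]
  | i, line :: rest, cur, curLen, curStart, acc =>
      let st : List (Int × Int × String) × List String × Int × Nat :=
        if ¬ cur.isEmpty ∧ curLen + PySem.Str.len line + 1 > maxc then
          (acc ++ [((curStart : Int) + 1, (i : Int), PySem.Str.join "\n" cur)], [], 0, i)
        else (acc, cur, curLen, curStart)
      if st.2.1.isEmpty ∧ PySem.Str.len line + 1 > maxc then
        pvLoopB nLines maxc (i + 1) rest st.2.1 st.2.2.1 (i + 1)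
          (st.1 ++ [((i : Int) + 1, (i : Int) + 1, PySem.Str.slice line none (some maxc))])
      else
        pvLoopB nLines maxc (i + 1) rest (st.2.1 ++ [line]) (st.2.2.1 + PySem.Str.len line + 1) st.2.2.2 st.1

-- overlap is (dead) in B too, kept for the parameter arity
def greedy_line_chunk_alt (text : String) (max_chars : Int) (overlap : Int) : List (Int × Int × String) :=
  let lines := PySem.Str.splitlines text
  pvLoopB lines.length max_chars 0 lines [] 0 0 []

-- ===== PRECONDITION & SPEC =====
def Spec_greedy_line_chunk (text : String) (max_chars : Int) (overlap : Int) (out : List (Int × Int × String)) : Prop := out = greedy_line_chunk_alt text max_chars overlap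
instance (text : String) (max_chars : Int) (overlap : Int) (out : List (Int × Int × String)) : Decidable (Spec_greedy_line_chunk text max_chars overlap out) := by unfold Spec_greedy_line_chunk; infer_instance

-- ===== CLAIM (what is proved, stated in full; the proofs are below) =====
def Claim_equal_greedy_line_chunk : Prop := ∀ (text : String) (max_chars : Int) (overlap : Int), Dom_greedy_line_chunk text max_chars overlap → Spec_greedy_line_chunk text max_chars overlap (greedy_line_chunk text max_chars overlap)

-- ===== LEMMAS AND PROOFS =====

theorem pvInnerA_out (lines : List String) (maxc : Int) (f i : Nat) (len : Int) (b : List String)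
    (h : ¬ i < lines.length) : pvInnerA lines maxc f i len b = (b, i) := by
  cases f with
  | zero => rfl
  | succ g => rw [pvInnerA, dif_neg h]

theorem pvInnerA_fuel (lines : List String) (maxc : Int) :
    ∀ (f1 f2 i : Nat) (len : Int) (b : List String), lines.length - i ≤ f1 → lines.length - i ≤ f2 →
      pvInnerA lines maxc f1 i len b = pvInnerA lines maxc f2 i len b := by
  intro f1
  induction f1 with
  | zero =>
    intro f2 i len b h1 h2
    rw [pvInnerA_out lines maxc 0 i len b (by omega), pvInnerA_out lines maxc f2 i len b (by omega)]
  | succ g ih =>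
    intro f2 i len b h1 h2
    by_cases h : i < lines.length
    · obtain ⟨g2, rfl⟩ : ∃ g2, f2 = g2 + 1 := ⟨f2 - 1, by omega⟩
      rw [pvInnerA, pvInnerA, dif_pos h, dif_pos h]
      by_cases hfit : len + PySem.Str.len lines[i] + 1 ≤ maxc
      · rw [if_pos hfit, if_pos hfit]
        exact ih g2 (i + 1) _ _ (by omega) (by omega)
      · rw [if_neg hfit, if_neg hfit]
    · rw [pvInnerA_out lines maxc _ i len b h, pvInnerA_out lines maxc f2 i len b h]

theorem pvInnerA_progress (lines : List String) (maxc : Int) :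
    ∀ (f i : Nat) (len : Int) (b : List String),
      i ≤ (pvInnerA lines maxc f i len b).2 ∧
      ((pvInnerA lines maxc f i len b).2 = i → (pvInnerA lines maxc f i len b).1 = b) := by
  intro f
  induction f with
  | zero => intro i len b; exact ⟨le_refl _, fun _ => rfl⟩
  | succ g ih =>
    intro i len b
    by_cases h : i < lines.length
    · by_cases hfit : len + PySem.Str.len lines[i] + 1 ≤ maxc
      · rw [pvInnerA, dif_pos h, if_pos hfit]
        have := ih (i + 1) (len + PySem.Str.len lines[i] + 1) (b ++ [lines[i]])
        exact ⟨by omega, fun he => absurd he (by omega)⟩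
      · rw [pvInnerA, dif_pos h, if_neg hfit]
        exact ⟨le_refl _, fun _ => rfl⟩
    · rw [pvInnerA_out lines maxc _ i len b h]
      exact ⟨le_refl _, fun _ => rfl⟩

theorem pvInnerA_stop (lines : List String) (maxc : Int) (i : Nat) (curLen : Int) (cur : List String)
    (h : i < lines.length) (hf : ¬ curLen + PySem.Str.len lines[i] + 1 ≤ maxc) :
    pvInnerA lines maxc lines.length i curLen cur = (cur, i) := by
  obtain ⟨g, hg⟩ : ∃ g, lines.length = g + 1 := ⟨lines.length - 1, by omega⟩
  rw [hg, pvInnerA, dif_pos (by omega : i < lines.length), if_neg hf]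

theorem pvInnerA_step (lines : List String) (maxc : Int) (i : Nat) (curLen : Int) (cur : List String)
    (h : i < lines.length) (hf : curLen + PySem.Str.len lines[i] + 1 ≤ maxc) :
    pvInnerA lines maxc lines.length i curLen cur =
      pvInnerA lines maxc lines.length (i + 1) (curLen + PySem.Str.len lines[i] + 1) (cur ++ [lines[i]]) := by
  obtain ⟨g, hg⟩ : ∃ g, lines.length = g + 1 := ⟨lines.length - 1, by omega⟩
  conv_lhs => rw [hg, pvInnerA]
  rw [dif_pos (by omega : i < lines.length), if_pos hf]
  exact pvInnerA_fuel lines maxc g lines.length (i + 1) _ _ (by omega) (by omega)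

theorem pvMaxNext_toNat (x : Int) (j : Nat) (hx : 0 ≤ x) :
    (max (if x ≠ 0 then (j : Int) - x else (j : Int)) (j : Int)).toNat = j := by
  by_cases h : x = 0
  · simp [h]
  · simp [h]
    omega

theorem pvBi_gt (lines : List String) (maxc : Int) (start : Nat) (h : start < lines.length) :
    start < (if (pvInnerA lines maxc lines.length start 0 []).1.isEmpty then
        ([PySem.Str.slice (lines[start]'h) none (some maxc)], start + 1)
      else pvInnerA lines maxc lines.length start 0 []).2 := by
  have hp := pvInnerA_progress lines maxc lines.length start 0 []
  by_cases he : (pvInnerA lines maxc lines.length start 0 []).1.isEmpty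
  · simp [he]
  · simp only [he, Bool.false_eq_true, if_false]
    have h2 : (pvInnerA lines maxc lines.length start 0 []).2 ≠ start := by
      intro hh; rw [hp.2 hh] at he; simp at he
    omega

theorem pvOuterA_nil (lines : List String) (maxc ov : Int) (f start : Nat)
    (h : ¬ start < lines.length) : pvOuterA lines maxc ov f start = [] := by
  cases f with
  | zero => rfl
  | succ g => rw [pvOuterA, dif_neg h]

theorem pvOuterA_fuel (lines : List String) (maxc ov : Int) :
    ∀ (f1 f2 start : Nat), lines.length - start ≤ f1 → lines.length - start ≤ f2 →
      pvOuterA lines maxc ov f1 start = pvOuterA lines maxc ov f2 start := by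
  intro f1
  induction f1 with
  | zero =>
    intro f2 start h1 h2
    rw [pvOuterA_nil lines maxc ov 0 start (by omega), pvOuterA_nil lines maxc ov f2 start (by omega)]
  | succ g ih =>
    intro f2 start h1 h2
    by_cases h : start < lines.length
    · obtain ⟨g2, rfl⟩ : ∃ g2, f2 = g2 + 1 := ⟨f2 - 1, by omega⟩
      rw [pvOuterA, pvOuterA, dif_pos h, dif_pos h]
      dsimp only
      rw [pvMaxNext_toNat _ _ (le_max_left _ _)]
      have hb := pvBi_gt lines maxc start h
      exact congrArg _ (ih g2 _ (by omega) (by omega))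
    · rw [pvOuterA_nil lines maxc ov _ start h, pvOuterA_nil lines maxc ov f2 start h]

theorem pvOuterA_cons (lines : List String) (maxc ov : Int) (start : Nat) (h : start < lines.length) :
    pvOuterA lines maxc ov lines.length start =
      (let r := pvInnerA lines maxc lines.length start 0 []
       let bi : List String × Nat :=
         if r.1.isEmpty then ([PySem.Str.slice lines[start] none (some maxc)], start + 1) else r
       ((start : Int) + 1, (bi.2 : Int), PySem.Str.join "\n" bi.1) ::
         pvOuterA lines maxc ov lines.length bi.2) := by
  obtain ⟨g, hg⟩ : ∃ g, lines.length = g + 1 := ⟨lines.length - 1, by omega⟩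
  conv_lhs => rw [hg, pvOuterA]
  rw [dif_pos (by omega : start < lines.length)]
  dsimp only
  rw [pvMaxNext_toNat _ _ (le_max_left _ _)]
  have hb := pvBi_gt lines maxc start h
  exact congrArg _ (pvOuterA_fuel lines maxc ov g lines.length _ (by omega) (by omega))

theorem pvJoin_singleton (s : String) : PySem.Str.join "\n" [s] = s := by
  simp [PySem.Str.join, PySem.Chars.join_singleton]

-- the oversized-line chunk A emits
theorem pvOuterA_trunc (lines : List String) (maxc ov : Int) (i : Nat)
    (h : i < lines.length) (ht : ¬ PySem.Str.len lines[i] + 1 ≤ maxc) :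
    pvOuterA lines maxc ov lines.length i =
      ((i : Int) + 1, (i : Int) + 1, PySem.Str.slice lines[i] none (some maxc)) ::
        pvOuterA lines maxc ov lines.length (i + 1) := by
  rw [pvOuterA_cons lines maxc ov i h]
  dsimp only
  rw [pvInnerA_stop lines maxc i 0 [] h (by omega)]
  simp [pvJoin_singleton]

-- main simulation: B's streaming state (cur, curLen, curStart) tracks A's inner loop from curStart
theorem pvMain (lines : List String) (maxc ov : Int) :
    ∀ (rest : List String) (i : Nat) (cur : List String) (curLen : Int) (curStart : Nat)
      (acc : List (Int × Int × String)),
      rest = lines.drop i → i ≤ lines.length →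
      (cur = [] → curLen = 0 ∧ curStart = i) →
      (cur ≠ [] → curStart < i ∧
        pvInnerA lines maxc lines.length curStart 0 [] = pvInnerA lines maxc lines.length i curLen cur) →
      pvLoopB lines.length maxc i rest cur curLen curStart acc =
        acc ++ pvOuterA lines maxc ov lines.length curStart := by
  intro rest
  induction rest with
  | nil =>
    intro i cur curLen curStart acc hdrop hile hinv1 hinv2
    have hi : i = lines.length := by
      have := List.drop_eq_nil_iff.mp hdrop.symm
      omega
    cases cur with
    | nil =>
      obtain ⟨-, hcs⟩ := hinv1 rfl
      rw [pvLoopB]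
      simp only [List.isEmpty_nil, if_pos]
      rw [pvOuterA_nil lines maxc ov lines.length _ (by omega)]
      simp
    | cons c cs =>
      obtain ⟨hcs, heq⟩ := hinv2 (by simp)
      rw [pvLoopB]
      rw [pvOuterA_cons lines maxc ov curStart (by omega)]
      dsimp only
      rw [heq, pvInnerA_out lines maxc lines.length i curLen (c :: cs) (by omega)]
      simp only [List.isEmpty_cons, Bool.false_eq_true, if_false]
      rw [pvOuterA_nil lines maxc ov lines.length _ (by omega)]
      simp [hi]
  | cons line rest' ih =>
    intro i cur curLen curStart acc hdrop hile hinv1 hinv2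
    have hi2 : i < lines.length := by
      by_contra hn
      rw [List.drop_eq_nil_iff.mpr (by omega)] at hdrop
      exact absurd hdrop (by simp)
    have hcons := List.drop_eq_getElem_cons hi2
    rw [← hdrop] at hcons
    injection hcons with hline hrest
    rw [pvLoopB]
    by_cases hc : cur = []
    · obtain ⟨hcl, hcs⟩ := hinv1 hc
      subst hc hcl hcs
      simp only [List.isEmpty_nil, not_true_eq_false, false_and, if_false]
      by_cases ht : PySem.Str.len line + 1 > maxc
      · rw [if_pos ⟨trivial, ht⟩,
          ih (curStart + 1) [] 0 (curStart + 1) _ hrest (by omega) (fun _ => ⟨rfl, rfl⟩) (by simp)]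
        rw [pvOuterA_trunc lines maxc ov curStart hi2 (by rw [← hline]; omega)]
        simp [hline]
      · rw [if_neg (by simpa using ht)]
        have hstep := pvInnerA_step lines maxc curStart 0 [] hi2 (by rw [← hline]; omega)
        rw [ih (curStart + 1) ([] ++ [line]) (0 + PySem.Str.len line + 1) curStart acc hrest (by omega)
          (by simp) (fun _ => ⟨by omega, by rw [hstep, hline]⟩)]
    · obtain ⟨hcs, heq⟩ := hinv2 hc
      have hne : cur.isEmpty = false := by simpa using hc
      by_cases hf : curLen + PySem.Str.len line + 1 > maxc
      · simp only [hne, Bool.false_eq_true, not_false_eq_true, true_and, if_pos hf,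
          List.isEmpty_nil]
        have hstop := pvInnerA_stop lines maxc i curLen cur hi2 (by rw [← hline]; omega)
        by_cases ht : PySem.Str.len line + 1 > maxc
        · rw [if_pos ht,
            ih (i + 1) [] 0 (i + 1) _ hrest (by omega) (fun _ => ⟨rfl, rfl⟩) (by simp)]
          rw [pvOuterA_cons lines maxc ov curStart (by omega)]
          dsimp only
          rw [heq, hstop]
          simp only [hne, Bool.false_eq_true, if_false]
          rw [pvOuterA_trunc lines maxc ov i hi2 (by rw [← hline]; omega)]
          simp [hline]
        · rw [if_neg (by simpa using ht)]
          have hstep := pvInnerA_step lines maxc i 0 [] hi2 (by rw [← hline]; omega)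
          rw [ih (i + 1) ([] ++ [line]) (0 + PySem.Str.len line + 1) i _ hrest (by omega)
            (by simp) (fun _ => ⟨by omega, by rw [hstep, hline]⟩)]
          rw [pvOuterA_cons lines maxc ov curStart (by omega)]
          dsimp only
          rw [heq, hstop]
          simp only [hne, Bool.false_eq_true, if_false]
          simp
      · simp only [hne, Bool.false_eq_true, not_false_eq_true, true_and, if_neg hf]
        simp only [gt_iff_lt, not_lt] at hf
        simp only [false_and, if_false]
        have hstep := pvInnerA_step lines maxc i curLen cur hi2 (by rw [← hline]; omega)
        rw [ih (i + 1) (cur ++ [line]) (curLen + PySem.Str.len line + 1) curStart acc hrest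
          (by omega) (by simp) (fun _ => ⟨by omega, by rw [heq, hstep, hline]⟩)]

theorem pv_eq (text : String) (max_chars overlap : Int) :
    greedy_line_chunk text max_chars overlap = greedy_line_chunk_alt text max_chars overlap := by
  unfold greedy_line_chunk greedy_line_chunk_alt
  rw [pvMain (PySem.Str.splitlines text) max_chars overlap (PySem.Str.splitlines text) 0 [] 0 0 []
    (by simp) (by omega) (fun _ => ⟨rfl, rfl⟩) (fun h => absurd rfl h)]
  simp

-- ===== VERDICT (by name: the statement is the Claim_ definition above) =====
theorem greedy_line_chunk_spec : Claim_equal_greedy_line_chunk := by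
  intro text max_chars overlap _
  unfold Spec_greedy_line_chunk
  exact pv_eq text max_chars overlap
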